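-- pv_equiv track=rewrite | github.com/elmepelme/algodat | lab2.py | build_graph
-- ===== SOURCE A (Python) =====
-- def build_graph(words):
--     node_dict = {} # dictionary där key är noden och value är mängd med grannar
--     for vert_word in words:
--         neighbors = set()
--         neighbors.add(vert_word)
--         u = vert_word[-4:]
--         for word in words:
--             if word != vert_word:
--                 v = word
--                 edge = True
--                 for letter in u:
--                     if letter not in v:
--                         edge = False
--                         break
--                     else:
--                         v = v.replace(letter,'',1) # 1an är att bara ta bort
--                         # en instans av letter i v
--                 if edge:
--                     neighbors.add(word)
--         node_dict[vert_word] = neighbors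
--     return node_dict
-- ===== SOURCE B (Python) =====
-- def build_graph(words):
--     def count(s):
--         m = {}
--         for c in s:
--             m[c] = m.get(c, 0) + 1
--         return m
--
--     distinct = []
--     seen = set()
--     for w in words:
--         if w not in seen:
--             seen.add(w)
--             distinct.append(w)
--
--     counted = [(w, count(w)) for w in distinct]
--
--     cache = {}
--     node_dict = {}
--     for vert in words:
--         key = tuple(sorted(vert[-4:]))
--         if key not in cache:
--             need = count(key)
--             cache[key] = [w for w, cm in counted
--                           if all(cm.get(c, 0) >= n for c, n in need.items())]
--         node_dict[vert] = {vert} | {w for w in cache[key] if w != vert}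
--     return node_dict
-- ===== Notes on version B (the rewrite author's own statement) =====
-- stated objective: faster
-- what changed: B precomputes one letter-count dictionary per distinct word and groups source words by the sorted multiset of their last-4 letters, computing each group's neighbour base list once and reusing it, instead of A's per-pair destructive remove-one-letter rescan for every (vertex, word) pair.
import Mathlib
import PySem

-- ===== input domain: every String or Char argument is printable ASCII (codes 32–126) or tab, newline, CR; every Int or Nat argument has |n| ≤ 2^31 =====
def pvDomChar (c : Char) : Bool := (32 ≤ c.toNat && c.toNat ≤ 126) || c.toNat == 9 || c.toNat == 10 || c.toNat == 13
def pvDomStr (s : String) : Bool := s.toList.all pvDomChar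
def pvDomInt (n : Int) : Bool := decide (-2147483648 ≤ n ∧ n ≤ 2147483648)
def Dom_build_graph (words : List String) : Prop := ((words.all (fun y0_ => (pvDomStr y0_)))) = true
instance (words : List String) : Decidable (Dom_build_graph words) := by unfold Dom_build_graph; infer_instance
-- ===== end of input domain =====

-- B groups words by the sorted multiset of their last-4 letters and tests neighbours by
-- precomputed letter-count dictionaries (one cached base list per multiset) instead of A's
-- per-pair destructive remove-one-letter rescan; same return value, proved equal.

-- ===== PORT A =====
-- inner loop of A: 'for letter in u: if letter not in v: edge = False; break; else: v = v.replace(letter,"",1)'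
-- ('letter in v' on a 1-char string is char membership; replace(letter,'',1) erases the first occurrence — exact)
def pvMatchLoop : List Char → List Char → Bool
  | [], _ => true
  | l :: rest, v => if v.contains l then pvMatchLoop rest (v.erase l) else false

-- body of A's outer loop ('for vert_word in words: ...')
def pvOuterA (words : List String) (node_dict : PySem.Dict String (PySem.Set String))
    (vert : String) : PySem.Dict String (PySem.Set String) :=
  let neighbors : PySem.Set String := PySem.Set.add PySem.Set.empty vert
  let u : List Char := PySem.List.slice vert.toList (some (-4)) none
  let neighbors := words.foldl (fun ns w =>
      if w = vert then ns
      else if pvMatchLoop u w.toList then PySem.Set.add ns w else ns) neighbors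
  node_dict.insert vert neighbors

def build_graph (words : List String) : List (String × List String) :=
  (words.foldl (pvOuterA words) PySem.Dict.empty).items

-- ===== PORT B =====
-- 'def count(s): m = {}; for c in s: m[c] = m.get(c, 0) + 1; return m'
def pvCount (s : List Char) : PySem.Dict Char Int :=
  s.foldl (fun m c => m.insert c (m.getD c 0 + 1)) PySem.Dict.empty

-- 'all(cm.get(c, 0) >= n for c, n in need.items())'
def pvSubTest (cm need : PySem.Dict Char Int) : Bool :=
  need.items.all (fun p => cm.getD p.1 0 ≥ p.2)

-- '[w for w, cm in counted if all(...)]'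
def pvBase (counted : List (String × PySem.Dict Char Int)) (need : PySem.Dict Char Int) : List String :=
  (counted.filter (fun p => pvSubTest p.2 need)).map (·.1)

-- body of B's main loop ('for vert in words: ...'), over the state (cache, node_dict)
def pvStepB (counted : List (String × PySem.Dict Char Int))
    (st : PySem.Dict (List Char) (List String) × PySem.Dict String (PySem.Set String))
    (vert : String) :
    PySem.Dict (List Char) (List String) × PySem.Dict String (PySem.Set String) :=
  let key : List Char :=
    PySem.List.sorted (PySem.List.slice vert.toList (some (-4)) none) (fun c => c) false
  let cache := if st.1.contains key then st.1
               else st.1.insert key (pvBase counted (pvCount key))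
  -- 'cache[key]': the key is present by construction, so getD with [] is exact here
  let entry := cache.getD key []
  (cache, st.2.insert vert (PySem.Set.union (PySem.Set.ofList [vert])
      (entry.filter (fun w => w ≠ vert))))

def build_graph_alt (words : List String) : List (String × List String) :=
  let sd := words.foldl (fun (p : PySem.Set String × List String) w =>
      if PySem.Set.contains p.1 w then p else (PySem.Set.add p.1 w, p.2 ++ [w]))
      (PySem.Set.empty, ([] : List String))
  let counted := sd.2.map (fun w => (w, pvCount w.toList))
  (words.foldl (pvStepB counted) (PySem.Dict.empty, PySem.Dict.empty)).2.items

-- ===== PRECONDITION & SPEC =====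
def Spec_build_graph (words : List String) (out : List (String × List String)) : Prop := out = build_graph_alt words
instance (words : List String) (out : List (String × List String)) : Decidable (Spec_build_graph words out) := by unfold Spec_build_graph; infer_instance

-- ===== CLAIM (what is proved, stated in full; the proofs are below) =====
def Claim_equal_build_graph : Prop := ∀ (words : List String), Dom_build_graph words → Spec_build_graph words (build_graph words)

-- ===== LEMMAS AND PROOFS =====

-- A's letter loop succeeds iff u's letters form a sub-multiset of v's.
theorem pvMatchLoop_iff (u v : List Char) : pvMatchLoop u v = true ↔ ∀ c, u.count c ≤ v.count c := by
  induction u generalizing v with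
  | nil => simp [pvMatchLoop]
  | cons l rest ih =>
    by_cases hl : l ∈ v
    · simp only [pvMatchLoop, List.contains_eq_mem, hl, decide_true, if_pos]
      rw [ih]
      have hpos : 0 < v.count l := List.count_pos_iff.mpr hl
      constructor
      · intro h c
        have hthis := h c
        rw [List.count_erase] at hthis
        rw [List.count_cons]
        by_cases hc : l = c
        · subst hc; simp only [beq_self_eq_true, if_pos] at hthis ⊢; omega
        · rw [if_neg (by simpa using hc)] at hthis ⊢; omega
      · intro h c
        have hthis := h c
        rw [List.count_cons] at hthis
        rw [List.count_erase]
        by_cases hc : l = c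
        · subst hc; simp only [beq_self_eq_true, if_pos] at hthis ⊢; omega
        · rw [if_neg (by simpa using hc)] at hthis ⊢; omega
    · have hfalse : pvMatchLoop (l :: rest) v = false := by
        simp [pvMatchLoop, List.contains_eq_mem, hl]
      rw [hfalse]
      simp only [Bool.false_eq_true, false_iff, not_forall, not_le]
      refine ⟨l, ?_⟩
      have h0 : v.count l = 0 := List.count_eq_zero.mpr hl
      simp [h0]

-- B's counter-subset test equals A's letter loop (key is any permutation of u).
theorem pvSubTest_eq (u key : List Char) (hperm : key.Perm u) (w : String) :
    pvSubTest (pvCount w.toList) (pvCount key) = pvMatchLoop u w.toList := by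
  apply Bool.coe_iff_coe.mp
  rw [pvMatchLoop_iff]
  have hc : ∀ s : List Char, pvCount s = PySem.Dict.counter s :=
    fun s => PySem.Dict.foldl_insert_getD_add_one_eq_counter s
  rw [pvSubTest, hc, hc, PySem.Dict.items_counter, List.all_map]
  simp only [Function.comp, List.all_eq_true, PySem.Dict.getD_counter, ge_iff_le, Nat.cast_le,
    decide_eq_true_eq]
  constructor
  · intro h c
    by_cases hm : c ∈ key
    · have := h c (by rw [PySem.Set.mem_ofList]; exact hm)
      rwa [hperm.count_eq] at this
    · rw [← hperm.count_eq, List.count_eq_zero.mpr hm]; omega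
  · intro h c _
    rw [hperm.count_eq]; exact h c

-- ofList commutes with filter.
theorem ofList_filter (p : String → Bool) (l : List String) :
    PySem.Set.ofList (l.filter p) = (PySem.Set.ofList l).filter p := by
  induction l using List.reverseRecOn with
  | nil => rfl
  | append_singleton xs x ih =>
    rw [List.filter_append, PySem.Set.ofList_append_singleton, PySem.Set.add_eq_ite]
    by_cases hp : p x = true
    · have hfx : List.filter p [x] = [x] := by simp [hp]
      rw [hfx, PySem.Set.ofList_append_singleton, ih, PySem.Set.add_eq_ite]
      by_cases hm : x ∈ PySem.Set.ofList xs
      · rw [if_pos hm, if_pos (List.mem_filter.mpr ⟨hm, hp⟩)]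
      · rw [if_neg hm, if_neg (fun h => hm (List.mem_filter.mp h).1), List.filter_append]
        simp [hp]
    · have hfx : List.filter p [x] = [] := by simp [hp]
      rw [hfx, List.append_nil, ih]
      by_cases hm : x ∈ PySem.Set.ofList xs
      · rw [if_pos hm]
      · rw [if_neg hm, List.filter_append]
        simp [hp]

-- the seen/distinct pair of B: both components track set(words) in first-occurrence order
theorem distinct_eq (ws : List String) (s : PySem.Set String) (hnd : s.Nodup) :
    (ws.foldl (fun (p : PySem.Set String × List String) w =>
      if PySem.Set.contains p.1 w then p else (PySem.Set.add p.1 w, p.2 ++ [w])) (s, s)).2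
      = PySem.Set.update s ws := by
  induction ws generalizing s with
  | nil => rfl
  | cons w ws ih =>
    simp only [List.foldl_cons, PySem.Set.update_cons]
    by_cases hm : w ∈ s
    · rw [if_pos (by simpa [PySem.Set.contains_iff] using hm), PySem.Set.add_of_mem hm]
      exact ih s hnd
    · rw [if_neg (by simpa [PySem.Set.contains_iff] using hm), PySem.Set.add_of_not_mem hm]
      exact ih (s ++ [w]) (hnd.append (List.nodup_singleton w)
        (by simpa [List.disjoint_singleton] using hm))

-- the last-4-letters key of B
def pvKey (vert : String) : List Char :=
  PySem.List.sorted (PySem.List.slice vert.toList (some (-4)) none) (fun c => c) false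

-- the A-side neighbour set of one vertex, in closed form
def pvNbrsA (words : List String) (vert : String) : PySem.Set String :=
  let u : List Char := PySem.List.slice vert.toList (some (-4)) none
  words.foldl (fun ns w =>
      if w = vert then ns
      else if pvMatchLoop u w.toList then PySem.Set.add ns w else ns)
    (PySem.Set.add PySem.Set.empty vert)

-- the B-side neighbour value of one vertex, with the cache value unfolded
def pvNbrsB (counted : List (String × PySem.Dict Char Int)) (vert : String) : PySem.Set String :=
  PySem.Set.union (PySem.Set.ofList [vert])
    ((pvBase counted (pvCount (pvKey vert))).filter (fun w => w ≠ vert))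

theorem nbrs_eq (words : List String) (vert : String) :
    pvNbrsA words vert =
      pvNbrsB ((PySem.Set.ofList words).map (fun w => (w, pvCount w.toList))) vert := by
  set u : List Char := PySem.List.slice vert.toList (some (-4)) none with hu
  have hperm : (pvKey vert).Perm u := PySem.List.sorted_perm u (fun c => c) false
  have hfun : (fun a : String => pvSubTest (pvCount a.toList) (pvCount (pvKey vert)))
      = fun a => pvMatchLoop u a.toList := funext (fun a => pvSubTest_eq u (pvKey vert) hperm a)
  -- A side: one single-test fold, then a Set.update of the filtered list
  have h1 : pvNbrsA words vert =
      words.foldl (fun ns w =>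
        if (decide (w ≠ vert) && pvMatchLoop u w.toList) then PySem.Set.add ns w else ns)
        [vert] := by
    have hinit : PySem.Set.add PySem.Set.empty vert = [vert] := rfl
    simp only [pvNbrsA, hinit]
    rw [← hu]
    apply PySem.List.foldl_congr_mem
    intro ns w _
    by_cases hw : w = vert
    · simp [hw]
    · by_cases hmm : pvMatchLoop u w.toList <;> simp [hw, hmm]
  rw [h1, PySem.List.foldl_if_eq_foldl_filter]
  have h2 : (List.filter (fun w => decide (w ≠ vert) && pvMatchLoop u w.toList) words).foldl
      PySem.Set.add [vert]
      = PySem.Set.update [vert] (words.filter (fun w => decide (w ≠ vert) && pvMatchLoop u w.toList)) := rfl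
  rw [h2, PySem.Set.update_eq_append_filter, ofList_filter, List.filter_filter]
  -- B side
  have h3 : pvBase ((PySem.Set.ofList words).map (fun w => (w, pvCount w.toList)))
        (pvCount (pvKey vert))
      = (PySem.Set.ofList words).filter (fun a => pvMatchLoop u a.toList) := by
    simp only [pvBase, List.filter_map, List.map_map, Function.comp_def]
    rw [hfun]
    simp
  rw [pvNbrsB, h3, List.filter_filter]
  have h4 : PySem.Set.union (PySem.Set.ofList [vert])
        ((PySem.Set.ofList words).filter
          (fun a => decide (a ≠ vert) && pvMatchLoop u a.toList))
      = [vert] ++ (PySem.Set.ofList words).filter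
          (fun a => decide (a ≠ vert) && pvMatchLoop u a.toList) := by
    refine PySem.Set.update_eq_append_of_disjoint _ _
      ((PySem.Set.nodup_ofList words).filter _) ?_
    intro x hx
    have hx2 := (List.mem_filter.mp hx).2
    simp only [Bool.and_eq_true, decide_eq_true_eq] at hx2
    simp [hx2.1]
  rw [h4]
  congr 1
  refine List.filter_congr ?_
  intro x hx
  by_cases hw : x = vert <;> simp [hw, List.contains_eq_mem]

-- B's stateful (cache, node_dict) fold produces the same dict as inserting pvNbrsB directly
theorem foldB_eq (counted : List (String × PySem.Dict Char Int)) (ws : List String)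
    (c : PySem.Dict (List Char) (List String)) (nd : PySem.Dict String (PySem.Set String))
    (hc : ∀ k v, c.get? k = some v → v = pvBase counted (pvCount k)) :
    (ws.foldl (pvStepB counted) (c, nd)).2
    = ws.foldl (fun nd vert => nd.insert vert (pvNbrsB counted vert)) nd := by
  induction ws generalizing c nd with
  | nil => rfl
  | cons vert ws ih =>
    rw [List.foldl_cons, List.foldl_cons]
    have hkfold : PySem.List.sorted (PySem.List.slice vert.toList (some (-4)) none)
        (fun c => c) false = pvKey vert := rfl
    by_cases h : c.contains (pvKey vert)
    · have hentry : c.getD (pvKey vert) [] = pvBase counted (pvCount (pvKey vert)) := by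
        have hsome : (c.get? (pvKey vert)).isSome := by
          rw [← PySem.Dict.contains_eq_isSome_get?]; exact h
        obtain ⟨v, hv⟩ := Option.isSome_iff_exists.mp hsome
        rw [PySem.Dict.getD_eq_get?_getD, hv, Option.getD_some, hc _ v hv]
      have hstep : pvStepB counted (c, nd) vert
          = (c, nd.insert vert (pvNbrsB counted vert)) := by
        simp only [pvStepB, hkfold, if_pos h, hentry]
        rfl
      rw [hstep]
      exact ih c _ hc
    · have hentry : (c.insert (pvKey vert) (pvBase counted (pvCount (pvKey vert)))).getD
          (pvKey vert) [] = pvBase counted (pvCount (pvKey vert)) := by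
        rw [PySem.Dict.getD_eq_get?_getD, PySem.Dict.get?_insert_self, Option.getD_some]
      have hstep : pvStepB counted (c, nd) vert
          = (c.insert (pvKey vert) (pvBase counted (pvCount (pvKey vert))),
             nd.insert vert (pvNbrsB counted vert)) := by
        simp only [pvStepB, hkfold, if_neg h, hentry]
        rfl
      rw [hstep]
      refine ih _ _ ?_
      intro k v hkv
      rw [PySem.Dict.get?_insert] at hkv
      by_cases hk : k = pvKey vert
      · rw [if_pos hk] at hkv
        rw [hk]; exact (Option.some_inj.mp hkv).symm
      · rw [if_neg hk] at hkv
        exact hc k v hkv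

-- the main proof: the two dict folds agree
theorem fold_eq (words : List String) :
    build_graph words = build_graph_alt words := by
  rw [build_graph, build_graph_alt]
  have hsd : (words.foldl (fun (p : PySem.Set String × List String) w =>
      if PySem.Set.contains p.1 w then p else (PySem.Set.add p.1 w, p.2 ++ [w]))
      (PySem.Set.empty, ([] : List String))).2 = PySem.Set.ofList words := by
    have := distinct_eq words [] List.nodup_nil
    simpa [PySem.Set.update_nil_left] using this
  simp only [hsd]
  rw [foldB_eq ((PySem.Set.ofList words).map (fun w => (w, pvCount w.toList))) words
      PySem.Dict.empty PySem.Dict.empty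
      (by intro k v hkv; rw [PySem.Dict.get?_empty] at hkv; cases hkv)]
  congr 1
  have hstep : pvOuterA words
      = fun (nd : PySem.Dict String (PySem.Set String)) vert =>
          nd.insert vert (pvNbrsB ((PySem.Set.ofList words).map (fun w => (w, pvCount w.toList))) vert) := by
    funext nd vert
    show nd.insert vert (pvNbrsA words vert) = _
    rw [nbrs_eq]
  rw [hstep]

-- ===== VERDICT (by name: the statement is the Claim_ definition above) =====
theorem build_graph_spec : Claim_equal_build_graph := by
  intro words _
  exact fold_eq words
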